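-- pv_equiv track=rewrite | github.com/superyossi23/mywork | htmlModule.py | get_LCR
-- ===== SOURCE A (Python) =====
-- def get_LCR(filelist):
--     filelist0, filelist1, filelist2 = [], [], []
--     for i in range(len(filelist)):
--         if i % 3 == 0:
--             filelist0.append(filelist[i])
--         elif i % 3 == 1:
--             filelist1.append(filelist[i])
--         elif i % 3 == 2:
--             filelist2.append(filelist[i])
--         else:
--             Exception('Something went wrong while executing get_LCR')
--     return filelist0, filelist1, filelist2
-- ===== SOURCE B (Python) =====
-- def get_LCR(filelist):
--     return filelist[0::3], filelist[1::3], filelist[2::3]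
-- ===== Notes on version B (the rewrite author's own statement) =====
-- stated objective: idiomatic
-- what changed: Replaced the single index loop that dispatches each element into one of three buckets by i % 3 with three independent extended-slice passes filelist[0::3], filelist[1::3], filelist[2::3].
import Mathlib
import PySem

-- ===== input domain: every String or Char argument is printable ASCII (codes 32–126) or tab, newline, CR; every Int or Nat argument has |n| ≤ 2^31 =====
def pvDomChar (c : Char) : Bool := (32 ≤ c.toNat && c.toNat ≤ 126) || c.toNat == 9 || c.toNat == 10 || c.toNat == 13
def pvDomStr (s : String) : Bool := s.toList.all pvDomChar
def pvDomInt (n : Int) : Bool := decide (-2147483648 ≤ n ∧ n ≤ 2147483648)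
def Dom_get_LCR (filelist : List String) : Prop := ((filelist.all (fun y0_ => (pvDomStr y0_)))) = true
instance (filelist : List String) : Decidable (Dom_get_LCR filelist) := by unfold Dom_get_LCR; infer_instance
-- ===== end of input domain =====

-- B replaces A's single index loop that dispatches each element by i % 3 with three
-- independent extended-slice (stride-3) passes; objective: idiomatic.

-- ===== PORT A =====
-- one loop over range(len(filelist)); the index i is always in range, so filelist[i]
-- is ported as pyGetD (exact there); the Python 'else' branch only constructs an
-- Exception without raising it, so it is a no-op (state unchanged).
def get_LCR (filelist : List String) : List String × List String × List String :=
  (PySem.List.pyRange 0 (PySem.List.len filelist) 1).foldl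
    (fun st i =>
      if PySem.Int.mod i 3 == 0 then
        (st.1 ++ [PySem.List.pyGetD filelist i ""], st.2.1, st.2.2)
      else if PySem.Int.mod i 3 == 1 then
        (st.1, st.2.1 ++ [PySem.List.pyGetD filelist i ""], st.2.2)
      else if PySem.Int.mod i 3 == 2 then
        (st.1, st.2.1, st.2.2 ++ [PySem.List.pyGetD filelist i ""])
      else st)
    ([], [], [])

-- ===== PORT B =====
-- filelist[0::3], filelist[1::3], filelist[2::3]; the step 3 ≠ 0 so slice? never fails
def get_LCR_alt (filelist : List String) : List String × List String × List String :=
  ((PySem.List.slice? filelist (some 0) none 3).getD [],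
   (PySem.List.slice? filelist (some 1) none 3).getD [],
   (PySem.List.slice? filelist (some 2) none 3).getD [])

-- ===== PRECONDITION & SPEC =====
def Spec_get_LCR (filelist : List String) (out : List String × List String × List String) : Prop := out = get_LCR_alt filelist
instance (filelist : List String) (out : List String × List String × List String) : Decidable (Spec_get_LCR filelist out) := by unfold Spec_get_LCR; infer_instance

-- ===== CLAIM (what is proved, stated in full; the proofs are below) =====
def Claim_equal_get_LCR : Prop := ∀ (filelist : List String), Dom_get_LCR filelist → Spec_get_LCR filelist (get_LCR filelist)

-- ===== LEMMAS AND PROOFS =====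

-- Python's i % 3 for the nonneg divisor 3 is Lean's emod
theorem pvMod3_eq (i : Int) : PySem.Int.mod i 3 = i % 3 := by
  simp [PySem.Int.mod, Int.fmod_eq_emod]

-- the indices 0 ≤ i < n with i % 3 = r are exactly range(r, n, 3)
theorem pvFilter_mod_eq (n r : Int) (h0 : 0 ≤ r) (h3 : r < 3) :
    (PySem.List.pyRange 0 n 1).filter (fun i => PySem.Int.mod i 3 == r) =
      PySem.List.pyRange r n 3 := by
  have hp₁ : List.Pairwise (· < ·) ((PySem.List.pyRange 0 n 1).filter (fun i => PySem.Int.mod i 3 == r)) :=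
    (PySem.List.pairwise_lt_pyRange_one 0 n).filter _
  have hp₂ : List.Pairwise (· < ·) (PySem.List.pyRange r n 3) := by
    rw [PySem.List.pyRange_of_pos r n (by norm_num)]
    refine List.pairwise_map.mpr ?_
    exact (List.pairwise_lt_range).imp (by intro a b h; omega)
  have hmem : ∀ a : Int, a ∈ (PySem.List.pyRange 0 n 1).filter (fun i => PySem.Int.mod i 3 == r) ↔
      a ∈ PySem.List.pyRange r n 3 := by
    intro a
    rw [List.mem_filter, PySem.List.mem_pyRange_iff_of_pos (by norm_num : (0:Int) < 3)]
    rw [PySem.List.mem_pyRange_one]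
    simp only [pvMod3_eq, beq_iff_eq]
    omega
  have hperm : ((PySem.List.pyRange 0 n 1).filter (fun i => PySem.Int.mod i 3 == r)).Perm
      (PySem.List.pyRange r n 3) :=
    (List.perm_ext_iff_of_nodup (hp₁.imp ne_of_lt) (hp₂.imp ne_of_lt)).mpr hmem
  exact hperm.eq_of_pairwise (fun a b _ _ hab hba => absurd hba (not_lt.mpr hab.le)) hp₁ hp₂

-- a stride-3 slice is the map of pyGetD over range(r, n, 3)
theorem pvSlice3_eq (xs : List String) (r : Int) (h0 : 0 ≤ r) (h3 : r < 3) :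
    PySem.List.slice? xs (some r) none 3 =
      some ((PySem.List.pyRange r (xs.length : Int) 3).map (fun i => PySem.List.pyGetD xs i "")) := by
  rw [PySem.List.pyRange_of_pos r _ (by norm_num)]
  unfold PySem.List.slice? PySem.List.sliceIndices
  norm_num [not_lt.mpr h0]
  by_cases hrn : r < (xs.length : Int)
  · have hmin : min r (xs.length : Int) = r := min_eq_left hrn.le
    simp only [hmin, if_pos hrn]

    have hfix : ∀ k ∈ List.range (((xs.length : Int) - r + 3 - 1) / 3).toNat,
        xs[(r + 3 * (k:Int)).toNat]? =
          (some ∘ ((fun i => PySem.List.pyGetD xs i "") ∘ fun k : Nat => r + 3 * (k:Int))) k := by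
      intro k hk
      have hklt : (k : Int) < (((xs.length : Int) - r + 3 - 1) / 3) := by
        have := List.mem_range.mp hk
        omega
      have hnat : (r + 3 * (k : Int)).toNat < xs.length := by omega
      simp only [Function.comp]
      rw [List.getElem?_eq_getElem hnat, PySem.List.pyGetD_of_nonneg xs "" (by omega),
        List.getD_eq_getElem xs "" hnat]
    rw [List.filterMap_congr hfix, List.filterMap_eq_map]
  · have hmin : min r (xs.length : Int) = (xs.length : Int) := min_eq_right (not_lt.mp hrn)
    simp [hmin, hrn]

-- ===== VERDICT (by name: the statement is the Claim_ definition above) =====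
theorem get_LCR_spec : Claim_equal_get_LCR := by
  intro filelist _
  unfold Spec_get_LCR get_LCR get_LCR_alt
  -- rewrite A's loop body componentwise (the three buckets are disjoint since i % 3 ∈ {0,1,2})
  rw [PySem.List.foldl_congr_mem _ _
    (fun (st : List String × List String × List String) (i : Int) =>
      ((if PySem.Int.mod i 3 == 0 then st.1 ++ [PySem.List.pyGetD filelist i ""] else st.1),
       (if PySem.Int.mod i 3 == 1 then st.2.1 ++ [PySem.List.pyGetD filelist i ""] else st.2.1),
       (if PySem.Int.mod i 3 == 2 then st.2.2 ++ [PySem.List.pyGetD filelist i ""] else st.2.2)))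
    _ ?_]
  · rw [PySem.List.foldl_prod_mk
      (fun acc i => if PySem.Int.mod i 3 == 0 then acc ++ [PySem.List.pyGetD filelist i ""] else acc)
      (fun (t : List String × List String) (i : Int) =>
        ((if PySem.Int.mod i 3 == 1 then t.1 ++ [PySem.List.pyGetD filelist i ""] else t.1),
         (if PySem.Int.mod i 3 == 2 then t.2 ++ [PySem.List.pyGetD filelist i ""] else t.2)))]
    rw [PySem.List.foldl_prod_mk
      (fun acc i => if PySem.Int.mod i 3 == 1 then acc ++ [PySem.List.pyGetD filelist i ""] else acc)
      (fun acc i => if PySem.Int.mod i 3 == 2 then acc ++ [PySem.List.pyGetD filelist i ""] else acc)]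
    rw [PySem.List.foldl_append_if, PySem.List.foldl_append_if, PySem.List.foldl_append_if]
    have hlen : PySem.List.len filelist = (filelist.length : Int) := rfl
    rw [hlen, pvFilter_mod_eq _ 0 (by norm_num) (by norm_num),
      pvFilter_mod_eq _ 1 (by norm_num) (by norm_num),
      pvFilter_mod_eq _ 2 (by norm_num) (by norm_num)]
    rw [pvSlice3_eq filelist 0 (by norm_num) (by norm_num),
      pvSlice3_eq filelist 1 (by norm_num) (by norm_num),
      pvSlice3_eq filelist 2 (by norm_num) (by norm_num)]
    simp
  · intro acc i hi
    have h0 : 0 ≤ i := (PySem.List.mem_pyRange_one.mp hi).1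
    have hm := pvMod3_eq i
    have : i % 3 = 0 ∨ i % 3 = 1 ∨ i % 3 = 2 := by omega
    rcases this with h | h | h <;>
      simp [h]
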